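-- pv_equiv track=rewrite | github.com/gh0stintheshe11/LeetCode-Solutions | solutions/check-if-point-is-reachable/Python3.py | isReachable
-- ===== SOURCE A (Python) =====
-- def isReachable(targetX: int, targetY: int) -> bool:
--     from math import gcd
--
--     def reduce_to_one(x):
--         while x % 2 == 0:
--             x //= 2
--         return x
--
--     # Reduce both targetX and targetY by factor of 2 since multiplying by 2 to reach a point means x or y can be halved if even
--     targetX = reduce_to_one(targetX)
--     targetY = reduce_to_one(targetY)
--
--     # Check if gcd of reduced targetX and targetY is 1
--     return gcd(targetX, targetY) == 1
-- ===== SOURCE B (Python) =====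
-- from math import gcd
--
--
-- def isReachable(targetX: int, targetY: int) -> bool:
--     # reachable iff gcd(targetX, targetY) is a power of two
--     g = gcd(targetX, targetY)
--     return g != 0 and g & (g - 1) == 0
-- ===== Notes on version B (the rewrite author's own statement) =====
-- stated objective: simpler
-- what changed: B drops both factor-of-2 stripping loops: it takes gcd(targetX, targetY) once and tests whether it is a power of two with the bit trick g & (g-1) == 0, using the identity that the odd parts are coprime iff the full gcd is a power of two.
import Mathlib
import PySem

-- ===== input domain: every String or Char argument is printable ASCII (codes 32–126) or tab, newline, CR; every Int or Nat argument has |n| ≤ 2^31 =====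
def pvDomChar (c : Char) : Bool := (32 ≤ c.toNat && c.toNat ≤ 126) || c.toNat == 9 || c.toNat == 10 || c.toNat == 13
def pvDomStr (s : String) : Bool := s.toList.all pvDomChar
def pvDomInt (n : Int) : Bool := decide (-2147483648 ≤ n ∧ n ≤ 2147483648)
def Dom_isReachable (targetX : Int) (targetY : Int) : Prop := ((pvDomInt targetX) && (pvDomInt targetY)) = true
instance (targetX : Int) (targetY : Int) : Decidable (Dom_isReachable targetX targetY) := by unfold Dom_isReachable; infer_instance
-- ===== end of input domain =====

-- B replaces A's two factor-of-2 stripping loops by one gcd plus the power-of-two bit test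
-- g & (g-1) == 0 (simpler); A diverges when either argument is 0, which Pre_ excludes.


-- ===== PORT A =====
-- reduce_to_one: while x % 2 == 0: x //= 2.  The Python loop diverges at x = 0
-- (excluded by Pre_); the `x = 0` guard only makes the same recursion total.
def reduceToOne (x : Int) : Int :=
  if x = 0 then 0
  else if PySem.Int.mod x 2 = 0 then reduceToOne (PySem.Int.floordiv x 2) else x
termination_by x.natAbs
decreasing_by
  rename_i hx hm
  rw [PySem.Int.mod_eq_zero_iff_dvd] at hm
  rw [PySem.Int.floordiv_eq_ediv_of_pos (by omega)]
  omega

def isReachable (targetX : Int) (targetY : Int) : Bool :=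
  decide (Int.gcd (reduceToOne targetX) (reduceToOne targetY) = 1)

-- ===== PORT B =====
def isReachable_alt (targetX : Int) (targetY : Int) : Bool :=
  let g : Int := Int.gcd targetX targetY
  decide (g ≠ 0) && decide (PySem.Int.band g (g - 1) = 0)

-- ===== PRECONDITION & SPEC =====
-- Pre_ excludes targetX = 0 or targetY = 0: there A's reduce_to_one loops forever
-- (0 % 2 == 0 and 0 // 2 == 0), so A never returns.
def Pre_isReachable (targetX : Int) (targetY : Int) : Prop := targetX ≠ 0 ∧ targetY ≠ 0
instance (targetX : Int) (targetY : Int) : Decidable (Pre_isReachable targetX targetY) := by unfold Pre_isReachable; infer_instance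
def pvWitness_isReachable : Int × Int := (3, 9)
def Spec_isReachable (targetX : Int) (targetY : Int) (out : Bool) : Prop := out = isReachable_alt targetX targetY
instance (targetX : Int) (targetY : Int) (out : Bool) : Decidable (Spec_isReachable targetX targetY out) := by unfold Spec_isReachable; infer_instance

-- ===== CLAIM (what is proved, stated in full; the proofs are below) =====
def Claim_equal_isReachable : Prop := ∀ (targetX : Int) (targetY : Int), Dom_isReachable targetX targetY → Pre_isReachable targetX targetY → Spec_isReachable targetX targetY (isReachable targetX targetY)

-- ===== LEMMAS AND PROOFS =====

-- Nat version of reduce_to_one, used only in the proofs.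
def redN (n : Nat) : Nat :=
  if n = 0 then 0 else if n % 2 = 0 then redN (n / 2) else n

theorem natAbs_reduceToOne (x : Int) : (reduceToOne x).natAbs = redN x.natAbs := by
  fun_induction reduceToOne x with
  | case1 => simp [redN]
  | case2 x hx hm ih =>
    rw [PySem.Int.mod_eq_zero_iff_dvd] at hm
    have h2 : (PySem.Int.floordiv x 2).natAbs = x.natAbs / 2 := by
      rw [PySem.Int.floordiv_eq_ediv_of_pos (by omega)]; omega
    have hpar : x.natAbs % 2 = 0 := by omega
    rw [ih, h2]
    conv_rhs => rw [redN]
    simp [show ¬ x.natAbs = 0 by omega, hpar]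
  | case3 x hx hm =>
    rw [PySem.Int.mod_eq_zero_iff_dvd] at hm
    have : ¬ (x.natAbs % 2 = 0) := by omega
    rw [redN]; simp [hx, this]

-- bit identities used for the power-of-two test
theorem land_odd_pred (m : Nat) : (2 * m + 1) &&& (2 * m) = 2 * m := by
  apply Nat.eq_of_testBit_eq
  intro i
  cases i with
  | zero => simp [Nat.testBit_zero]
  | succ i =>
      have h1 : (2 * m + 1) / 2 = m := by omega
      have h2 : (2 * m) / 2 = m := by omega
      rw [Nat.testBit_land]
      simp [Nat.testBit_succ, h1, h2]

theorem land_even_pred (m : Nat) (hm : 0 < m) :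
    (2 * m) &&& (2 * m - 1) = 2 * (m &&& (m - 1)) := by
  apply Nat.eq_of_testBit_eq
  intro i
  cases i with
  | zero => simp [Nat.testBit_zero]
  | succ i =>
      have h1 : (2 * m) / 2 = m := by omega
      have h2 : (2 * m - 1) / 2 = m - 1 := by omega
      have h3 : (2 * (m &&& (m - 1))) / 2 = m &&& (m - 1) := by omega
      rw [Nat.testBit_land]
      simp [Nat.testBit_succ, h1, h2, h3]

theorem pow2_test (n : Nat) : (n ≠ 0 ∧ n &&& (n - 1) = 0) ↔ ∃ k, n = 2 ^ k := by
  constructor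
  · rintro ⟨hn, hland⟩
    induction n using Nat.strong_induction_on with
    | _ n ih =>
      rcases Nat.even_or_odd n with he | ho
      · obtain ⟨m, hm⟩ := he
        have hmpos : 0 < m := by omega
        have hn2 : n = 2 * m := by omega
        rw [hn2, land_even_pred m hmpos] at hland
        have : m &&& (m - 1) = 0 := by omega
        obtain ⟨k, hk⟩ := ih m (by omega) (by omega) this
        exact ⟨k + 1, by rw [hn2, hk]; ring⟩
      · obtain ⟨m, hm⟩ := ho
        have hn2 : n = 2 * m + 1 := by omega
        rw [hn2, show 2 * m + 1 - 1 = 2 * m by omega, land_odd_pred] at hland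
        exact ⟨0, by omega⟩
  · rintro ⟨k, rfl⟩
    refine ⟨by positivity, ?_⟩
    apply Nat.eq_of_testBit_eq
    intro i
    simp only [Nat.testBit_land, Nat.zero_testBit]
    by_cases h : i = k
    · subst h
      have : (2 ^ i - 1).testBit i = false :=
        Nat.testBit_eq_false_of_lt (by have := Nat.one_le_two_pow (n := i); omega)
      simp [this]
    · simp [Nat.testBit_two_pow_of_ne (fun hk => h hk.symm)]

theorem redN_gcd (a b : Nat) (ha : 0 < a) (hb : 0 < b) :
    (Nat.gcd (redN a) (redN b) = 1 ↔ ∃ k, Nat.gcd a b = 2 ^ k) := by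
  induction hn : a + b using Nat.strong_induction_on generalizing a b with
  | _ n ih =>
    subst hn
    rcases Nat.even_or_odd a with hea | hoa <;> rcases Nat.even_or_odd b with heb | hob
    · -- both even
      obtain ⟨a', ha'⟩ := hea; obtain ⟨b', hb'⟩ := heb
      have ha2 : a = 2 * a' := by omega
      have hb2 : b = 2 * b' := by omega
      have hra : redN a = redN a' := by rw [redN]; simp [show ¬ a = 0 by omega, show a % 2 = 0 by omega, show a / 2 = a' by omega]
      have hrb : redN b = redN b' := by rw [redN]; simp [show ¬ b = 0 by omega, show b % 2 = 0 by omega, show b / 2 = b' by omega]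
      rw [hra, hrb, ha2, hb2, Nat.gcd_mul_left]
      rw [ih (a' + b') (by omega) a' b' (by omega) (by omega) rfl]
      constructor
      · rintro ⟨k, hk⟩; exact ⟨k + 1, by rw [hk]; ring⟩
      · rintro ⟨k, hk⟩
        have hg : 0 < Nat.gcd a' b' := Nat.gcd_pos_of_pos_left _ (by omega)
        cases k with
        | zero => omega
        | succ k =>
          refine ⟨k, Nat.eq_of_mul_eq_mul_left (show 0 < 2 by norm_num) ?_⟩
          rw [hk]; ring
    · -- a even, b odd
      obtain ⟨a', ha'⟩ := hea
      have ha2 : a = 2 * a' := by omega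
      have hra : redN a = redN a' := by rw [redN]; simp [show ¬ a = 0 by omega, show a % 2 = 0 by omega, show a / 2 = a' by omega]
      have hcop : Nat.Coprime 2 b := Nat.coprime_two_left.mpr hob
      rw [hra, ha2, hcop.gcd_mul_left_cancel a']
      exact ih (a' + b) (by omega) a' b (by omega) hb rfl
    · -- a odd, b even
      obtain ⟨b', hb'⟩ := heb
      have hb2 : b = 2 * b' := by omega
      have hrb : redN b = redN b' := by rw [redN]; simp [show ¬ b = 0 by omega, show b % 2 = 0 by omega, show b / 2 = b' by omega]
      have hcop : Nat.Coprime 2 a := Nat.coprime_two_left.mpr hoa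
      rw [hrb, hb2, hcop.gcd_mul_left_cancel_right b']
      exact ih (a + b') (by omega) a b' ha (by omega) rfl
    · -- both odd
      have ha1 : a % 2 = 1 := Nat.odd_iff.mp hoa
      have hb1 : b % 2 = 1 := Nat.odd_iff.mp hob
      have hra : redN a = a := by rw [redN]; simp [show ¬ a = 0 by omega, show ¬ a % 2 = 0 by omega]
      have hrb : redN b = b := by rw [redN]; simp [show ¬ b = 0 by omega, show ¬ b % 2 = 0 by omega]
      rw [hra, hrb]
      constructor
      · intro h; exact ⟨0, by simpa using h⟩
      · rintro ⟨k, hk⟩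
        cases k with
        | zero => simpa using hk
        | succ k =>
          have h2 : (2 : Nat) ∣ Nat.gcd a b := by rw [hk]; exact Dvd.intro (2 ^ k) (by ring)
          have h2a : (2 : Nat) ∣ a := h2.trans (Nat.gcd_dvd_left a b)
          omega

-- ===== VERDICT (by name: the statement is the Claim_ definition above) =====
theorem gcd_ne_zero_lemma (x y : Int) (hx : x ≠ 0) : Int.gcd x y ≠ 0 := by
  intro h
  exact hx (Int.gcd_eq_zero_iff.mp h).1

theorem isReachable_spec : Claim_equal_isReachable := by
  intro x y _ hpre
  obtain ⟨hx, hy⟩ := hpre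
  unfold Spec_isReachable isReachable isReachable_alt
  have hax : 0 < x.natAbs := by omega
  have hay : 0 < y.natAbs := by omega
  have hgcd : Int.gcd (reduceToOne x) (reduceToOne y) = Nat.gcd (redN x.natAbs) (redN y.natAbs) := by
    rw [Int.gcd, natAbs_reduceToOne, natAbs_reduceToOne]
  set n : Nat := Int.gcd x y with hn
  have hn0 : n ≠ 0 := gcd_ne_zero_lemma x y hx
  have hband : PySem.Int.band (n : Int) ((n : Int) - 1) = ((n &&& (n - 1) : Nat) : Int) := by
    rw [show ((n : Int) - 1) = ((n - 1 : Nat) : Int) by omega, PySem.Int.band_natCast]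
  have key : (Nat.gcd (redN x.natAbs) (redN y.natAbs) = 1) ↔ (n ≠ 0 ∧ n &&& (n - 1) = 0) :=
    (redN_gcd x.natAbs y.natAbs hax hay).trans (pow2_test n).symm
  by_cases h : Nat.gcd (redN x.natAbs) (redN y.natAbs) = 1
  · obtain ⟨h1, h2⟩ := key.mp h
    simp [hgcd, h, hband, h1, h2]
  · have h2 : n &&& (n - 1) ≠ 0 := fun hl => h (key.mpr ⟨hn0, hl⟩)
    simp [hgcd, h, hband, hn0, h2]
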